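-- pv_equiv track=rewrite | github.com/AGoodGentleman/UTN-AyED | Paradigmas de la Programación/Primer Trabajo/Proyecto 2.py | limitar_140
-- ===== SOURCE A (Python) =====
-- def limitar_140(texto):
--     resultado = ""
--     contador = 0
--
--     for caracter in texto:
--         if caracter != "\n":
--             if contador < 140:
--                 resultado += caracter
--                 contador += 1
--
--     return resultado
-- ===== SOURCE B (Python) =====
-- def limitar_140(texto):
--     # Segment-wise: jump from newline to newline with partition, append whole
--     # slices, and stop as soon as 140 characters have been collected.
--     partes = []
--     restante = 140
--     while texto and restante > 0:
--         cabeza, _, texto = texto.partition("\n")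
--         trozo = cabeza[:restante]
--         partes.append(trozo)
--         restante -= len(trozo)
--     return "".join(partes)
-- ===== Notes on version B (the rewrite author's own statement) =====
-- stated objective: alternative
-- what changed: Replaces the per-character accumulator loop with a counter by a segment-wise loop that partitions on newlines, appends whole slices, and stops early once 140 characters are collected.
import Mathlib
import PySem

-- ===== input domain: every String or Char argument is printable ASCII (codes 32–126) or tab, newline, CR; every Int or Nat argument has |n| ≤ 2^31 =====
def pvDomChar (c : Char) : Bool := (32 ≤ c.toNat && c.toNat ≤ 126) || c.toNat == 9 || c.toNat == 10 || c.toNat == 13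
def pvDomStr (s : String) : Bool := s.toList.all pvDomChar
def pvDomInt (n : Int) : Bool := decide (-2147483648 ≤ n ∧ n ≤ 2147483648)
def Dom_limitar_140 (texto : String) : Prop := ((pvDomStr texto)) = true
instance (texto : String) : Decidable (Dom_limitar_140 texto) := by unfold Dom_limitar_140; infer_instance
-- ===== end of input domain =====

-- B replaces A's per-character accumulator loop (counter capped at 140) by a
-- segment-wise loop: partition on '\n', append whole slices, stop once 140
-- characters are collected (alternative decomposition; same asymptotic cost).

-- ===== PORT A =====
-- loop state: (resultado, contador); resultado kept as List Char, returned as a String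
def limitar_140 (texto : String) : String :=
  (texto.toList.foldl
    (fun (st : List Char × Int) caracter =>
      if caracter ≠ '\n' then
        if st.2 < 140 then (st.1 ++ [caracter], st.2 + 1) else st
      else st)
    ([], 0)).1 |> String.ofList

-- ===== PORT B =====
-- while texto and restante > 0: cabeza, _, texto = texto.partition("\n"); …
-- str.partition("\n"): head = takeWhile (· ≠ '\n'), rest = tail of dropWhile
-- (exact: if no '\n', dropWhile = [] and its tail = [], matching rest = "").
-- termination measure for the segment loop (cited by limitar140Seg's decreasing_by)
theorem seg_resto_lt (l : List Char) (hl : l ≠ []) :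
    ((l.dropWhile (· ≠ '\n')).drop 1).length < l.length := by
  have h1 : (l.dropWhile (· ≠ '\n')).length ≤ l.length := List.length_dropWhile_le _ _
  have h2 : 0 < l.length := List.length_pos_of_ne_nil hl
  simp only [List.length_drop]
  omega

def limitar140Seg (l : List Char) (restante : Nat) (partes : List Char) : List Char :=
  if l = [] ∨ restante = 0 then partes
  else
    let cabeza := l.takeWhile (· ≠ '\n')
    let resto := (l.dropWhile (· ≠ '\n')).drop 1
    let trozo := cabeza.take restante
    limitar140Seg resto (restante - trozo.length) (partes ++ trozo)
termination_by l.length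
decreasing_by
  rename_i h
  exact seg_resto_lt l (by push_neg at h; exact h.1)

def limitar_140_alt (texto : String) : String :=
  String.ofList (limitar140Seg texto.toList 140 [])

-- ===== PRECONDITION & SPEC =====
def Spec_limitar_140 (texto : String) (out : String) : Prop := out = limitar_140_alt texto
instance (texto : String) (out : String) : Decidable (Spec_limitar_140 texto out) := by unfold Spec_limitar_140; infer_instance

-- ===== CLAIM (what is proved, stated in full; the proofs are below) =====
def Claim_equal_limitar_140 : Prop := ∀ (texto : String), Dom_limitar_140 texto → Spec_limitar_140 texto (limitar_140 texto)

-- ===== LEMMAS AND PROOFS =====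

-- A's loop builds r ++ (first (140 - n) non-newline chars)
theorem limitar_loop (l : List Char) : ∀ (r : List Char) (n : Int),
    (l.foldl
      (fun (st : List Char × Int) caracter =>
        if caracter ≠ '\n' then
          if st.2 < 140 then (st.1 ++ [caracter], st.2 + 1) else st
        else st)
      (r, n)).1 = r ++ (l.filter (fun c => c ≠ '\n')).take (140 - n).toNat := by
  induction l with
  | nil => intro r n; simp
  | cons c l ih =>
    intro r n
    rw [List.foldl_cons]
    by_cases hc : c = '\n'
    · have hf : (if c ≠ '\n' then if (r, n).2 < 140 then ((r, n).1 ++ [c], (r, n).2 + 1)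
          else (r, n) else (r, n)) = (r, n) := by simp [hc]
      rw [hf, ih]; simp [hc]
    · by_cases hn : n < 140
      · have hf : (if c ≠ '\n' then if (r, n).2 < 140 then ((r, n).1 ++ [c], (r, n).2 + 1)
            else (r, n) else (r, n)) = (r ++ [c], n + 1) := by simp [hc, hn]
        rw [hf, ih]
        have h1 : (140 - n).toNat = (140 - (n + 1)).toNat + 1 := by omega
        simp [hc, h1]
      · have hf : (if c ≠ '\n' then if (r, n).2 < 140 then ((r, n).1 ++ [c], (r, n).2 + 1)
            else (r, n) else (r, n)) = (r, n) := by simp [hc, hn]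
        rw [hf, ih]
        have h1 : (140 - n).toNat = 0 := by omega
        simp [hc, h1]

-- filter decomposes into the first newline-free segment plus the filtered remainder
theorem filter_seg (l : List Char) :
    l.filter (fun c => c ≠ '\n') =
      l.takeWhile (· ≠ '\n') ++ ((l.dropWhile (· ≠ '\n')).drop 1).filter (fun c => c ≠ '\n') := by
  induction l with
  | nil => simp
  | cons c l ih =>
    by_cases hc : c = '\n'
    · simp [hc]
    · simp only [List.filter_cons, List.takeWhile_cons, List.dropWhile_cons]
      simp [hc]
      simpa [List.drop_one] using ih

-- B's segment loop computes partes ++ (first restante non-newline chars)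
-- (fuel induction on an upper bound of l.length)
theorem limitar140Seg_eq_aux (n : Nat) : ∀ (l : List Char), l.length ≤ n →
    ∀ (restante : Nat) (partes : List Char),
    limitar140Seg l restante partes =
      partes ++ (l.filter (fun c => c ≠ '\n')).take restante := by
  induction n with
  | zero =>
    intro l hl restante partes
    have hnil : l = [] := List.eq_nil_of_length_eq_zero (Nat.le_zero.mp hl)
    subst hnil
    rw [limitar140Seg]
    simp
  | succ n ih =>
    intro l hl restante partes
    rw [limitar140Seg]
    split
    · rename_i h
      rcases h with h | h
      · subst h; simp
      · subst h; simp
    · rename_i h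
      push_neg at h
      have hlt := seg_resto_lt l h.1
      rw [ih _ (by omega)]
      rw [List.append_assoc]
      congr 1
      rw [filter_seg l, List.take_append]
      have hlen : restante - (List.take restante (l.takeWhile (· ≠ '\n'))).length
          = restante - (l.takeWhile (· ≠ '\n')).length := by
        simp only [List.length_take]
        omega
      rw [hlen]

theorem limitar140Seg_eq (l : List Char) (restante : Nat) (partes : List Char) :
    limitar140Seg l restante partes =
      partes ++ (l.filter (fun c => c ≠ '\n')).take restante :=
  limitar140Seg_eq_aux l.length l le_rfl restante partes

theorem limitar_140_spec : Claim_equal_limitar_140 := by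
  intro texto _
  unfold Spec_limitar_140 limitar_140 limitar_140_alt
  rw [limitar_loop, limitar140Seg_eq]
  rfl
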